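/- GENERATED by tools/from_farm_form.py from prooffarm-gif/accepted/DGifCloseFile.5/Lemmas.lean (a worked proof of the farm's unit `DGifCloseFile.5`,
   accepted by the verdict) — do not edit. -/
import Gif.Spec.Units.DGifCloseFile_5
import Gif.Spec.AllSegs

/-!
  Lemmas for the unit `DGifCloseFile.5` (0x109d13 … the `ret` at 0x109d7b, and 0x109dc0 … 0x109dc8; dgif_lib.c:708-735): the tail of
  `DGifCloseFile`, walked in THREE STEPS that meet at the return addresses of the two calls of `free` (the heap changes at each:
  `Hc` → `Hc.release pv` → `(Hc.release pv).release gif`). The assertion at both meeting points is the function's own `At`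
  (Gif/Spec/Seg_DGifCloseFile.lean) for the present heap, plus `CursorOK` (and, at ret15, "gif is still live").

      cf5_seg_free_pv    0x109d13 … the three checked loads (`gif.Private`, `pv.FileState`, `pv.File`), `free(Private)` … 0x109d4c (ret15)
      cf5_seg_free_gif   0x109d4c … `free(GifFile)` … 0x109d54 (ret16)
      cf5_errLive        `*ErrorCode` is live under every heap (no frame pushed: DGifCloseFile has no protected frame)
      cf5_seg_exit       0x109d54 … `ErrorCode == NULL` or the checked store `*ErrorCode = 0` … `ret`: `Returned`
-/

open X86 X86.User Asan ProgX.Base ProgX.Base.Spec Gif.Spec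

set_option maxRecDepth 4000
set_option maxHeartbeats 4000000

namespace Gif.Spec.DGifCloseFile_5

/-- **109D13H … `free(Private)` … 109D4CH (ret15)** (dgif_lib.c:708-729): the checked load of `gif.Private` (`r13 = pv`), the checked
load of `pv.FileState` (8: `and r12d, 8 ; je` not taken), the checked load of `pv.File` (0: `jne` not taken), `free(pv)` with the
present heap `Hc`. At ret15 the function's assertion `At` holds for the heap `Hc.release F.pv`; the cursor was not met; gif — another
object than pv (`Owns.base_ne`) — is still live. -/
theorem cf5_seg_free_pv (Lay : Layout) (hLay : Lay.hi = 0x1000000) (μ : Microarch) (hμ : UserX.MicroOK μ) (u₀ : State)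
    (hcode : HasCodeNat Lay u₀ Gif.L.DGifCloseFile.entry Gif.Code.code_DGifCloseFile.nat Gif.L.DGifCloseFile.size)
    (h_load8 : Asan.SmallCheck Lay μ ProgX.Base.WayInv (ProgX.Base.CodeOK u₀) [.rax, .rcx, .rdx] 8 ProgX.Base.L.__asan_load8_noabort.entry)
    (h_load4 : Asan.SmallCheck Lay μ ProgX.Base.WayInv (ProgX.Base.CodeOK u₀) [.rax, .rcx, .rdx] 4 ProgX.Base.L.__asan_load4_noabort.entry)
    (H : Heap) (rest : List Obj) (frames : List (Nat × FrameLayout)) (F : Forest) (R : Rd) (Hc : Heap) (e : State) (ret : Word)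
    (h_free : Calls Lay μ ProgX.Base.WayInv (ProgX.Base.conv u₀) ProgX.Base.L.free.entry
      (ProgX.Base.Spec.free.spec Hc rest frames 24936))
    (v : State) (hat : DGifCloseFile.Closing Gif.L.DGifCloseFile.at_109d13 H rest frames F R Hc (DGifCloseFile.bare F) u₀ e ret v) :
    ReachVia Lay μ ProgX.Base.WayInv v (fun w =>
      DGifCloseFile.At Gif.L.DGifCloseFile.ret15 H rest frames F R (Hc.release F.pv) u₀ e ret w ∧
      CursorOK R w.mem ∧ (Hc.release F.pv).Live F.gif 120) := by
  obtain ⟨hA, hshape, howns⟩ := hat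
  have he := hA.entry
  v_entry he
  obtain ⟨henv, hrdi, herr⟩ := hA.pre
  have w_rip := hA.rip
  have c_rsp : v.reg .rsp = e.reg .rsp - 40 := hA.rsp
  have c_rbx : v.reg .rbx = e.reg .rdi := hA.rbx
  have c_rbp : v.reg .rbp = e.reg .rsi := hA.rbp
  have w_kept : RegsKept [.rsp] v v := RegsKept.refl _ _
  have w_eq : Mem.EqOn ProgX.Base.L.textLo ProgX.Base.L.textHi u₀.mem v.mem := ProgX.Base.conv_code_eqOn hA.code
  have hdf := (show abiInv _ from hA.abi).1
  have hmx := (show abiInv _ from hA.abi).2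
  have hsse := ProgX.Base.sseOK_of_abiInv hA.abi
  -- where gif and pv are: inside the heap's region, as numbers
  have hbase : Hc.base = 0x800000 := hA.region.1.trans henv.heap.base
  have hlimit : Hc.limit = 0xC00000 := hA.region.2.trans henv.heap.limit
  have hgmem : (F.gif, 120) ∈ (DGifCloseFile.bare F).owned := List.mem_cons_self
  have hpmem : (F.pv, 24936) ∈ (DGifCloseFile.bare F).owned := List.mem_cons_of_mem _ List.mem_cons_self
  have hgin := howns.inside hA.inv.heap hgmem
  have hpin := howns.inside hA.inv.heap hpmem
  simp only at hgin hpin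
  rw [hbase] at hgin hpin
  have hg1 := hgin.1
  have hg2 := hgin.2.2.2.2
  have hp1 := hpin.1
  have hp2 := hpin.2.2.2.2
  clear hgin hpin
  -- the three loads, as facts about the memory at the cut in the walker's form
  have hpriv := hshape.priv
  have hstate := hshape.state
  have hfile := hshape.file
  simp only [gfield] at hpriv hstate hfile
  have l_priv : v.mem.readLE (e.reg .rdi + 0x70) 8 = F.pv := by
    rw [rd_eq_readLE v.mem (e.reg .rdi + 0x70) (F.gif + 112) 8 (by u_omega)]
    exact hpriv
  have l_state : v.mem.readLE (UInt64.ofNat F.pv) 4 = 8 := by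
    rw [rd_eq_readLE v.mem (UInt64.ofNat F.pv) F.pv 4 (by u_omega)]
    exact hstate
  have l_file : v.mem.readLE (UInt64.ofNat F.pv + 0x40) 8 = 0 := by
    rw [rd_eq_readLE v.mem (UInt64.ofNat F.pv + 0x40) (F.pv + 64) 8 (by u_omega)]
    exact hfile
  u_walk hcode [hμ.vendor] until [Gif.L.DGifCloseFile.ret15] span [ProgX.Base.L.textLo, ProgX.Base.L.textHi] side (v_side)
  case check_109d17 =>
    -- 0x109d17 (dgif_lib.c:708): the load of `gif.Private` lies inside the live 120-byte object gif
    have hun : ShadowUntouched v.mem s_109d17.mem := by v_untouched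
    have hl : LiveIn (Hc.liveObjs ++ rest) frames F.gif 120 :=
      (howns.live _ hgmem).liveIn rest frames (Nat.le_refl _) (Nat.le_refl _)
    exact hl.accSmall hA.inv.shadow hun _ 8 (by decide) (by u_omega) (by u_omega)
  case check_109d23 =>
    -- 0x109d23 (dgif_lib.c:710): the load of `Private->FileState` lies inside the live object pv
    have hun : ShadowUntouched v.mem s_109d23.mem := by v_untouched
    have hl : LiveIn (Hc.liveObjs ++ rest) frames F.pv 24936 :=
      (howns.live _ hpmem).liveIn rest frames (Nat.le_refl _) (Nat.le_refl _)
    exact hl.accSmall hA.inv.shadow hun _ 4 (by decide) (by u_omega) (by u_omega)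
  case check_109d36 =>
    -- 0x109d36 (dgif_lib.c:720): the load of `Private->File` lies inside the live object pv
    have hun : ShadowUntouched v.mem s_109d36.mem := by v_untouched
    have hl : LiveIn (Hc.liveObjs ++ rest) frames F.pv 24936 :=
      (howns.live _ hpmem).liveIn rest frames (Nat.le_refl _) (Nat.le_refl _)
    exact hl.accSmall hA.inv.shadow hun _ 8 (by decide) (by u_omega) (by u_omega)
  case call_inv =>
    v_inv
  case pre_109d47 =>
    -- 0x109d47 (dgif_lib.c:729) `free(Private)`: the heap's invariant over the pushed return address; pv is live
    have e_rsp : (s_109d47.reg .rsp).toNat + 8 = (e.reg .rsp).toNat - 40 := by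
      rw [w_rsp]
      u_omega
    refine ⟨⟨?_, hbase, hlimit, henv.heap.text, henv.heap.offText⟩, Or.inr ?_⟩
    · rw [e_rsp, w_mem]
      exact hA.inv.writeLE_out _ _ _ (by u_omega) (by rw [hbase]; left; u_omega) (by left; u_omega)
    · rw [w_rdi, toNat_ofNat_addr F.pv (by omega)]
      exact howns.live _ hpmem
  -- 0x109d4c (ret15): `free(Private)` has returned: the heap is `Hc.release F.pv`
  have hp64 : (UInt64.ofNat F.pv).toNat = F.pv := toNat_ofNat_addr F.pv (by omega)
  have hne1 : (s_109d47.reg .rdi).toNat ≠ 0 := by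
    rw [w_rdi_109d47, hp64]
    omega
  have hinv1 := w_post.2 hne1
  rw [w_rdi_109d47, hp64] at hinv1
  clear w_post
  have e8 : (s_109d47.reg .rsp).toNat + 8 = (e.reg .rsp).toNat - 40 := by
    rw [w_rsp_109d47]
    u_omega
  rw [e8] at hinv1
  have hcur := henv.ctx.cursor_range henv.heap.inv.shadow
  have k_r13 : v.mem.readLE (e.reg .rsp - 8) 8 = (e.reg .r13).toNat := hA.slot_r13
  have k_r12 : v.mem.readLE (e.reg .rsp - 16) 8 = (e.reg .r12).toNat := hA.slot_r12
  have k_rbp : v.mem.readLE (e.reg .rsp - 24) 8 = (e.reg .rbp).toNat := hA.slot_rbp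
  have k_rbx : v.mem.readLE (e.reg .rsp - 32) 8 = (e.reg .rbx).toNat := hA.slot_rbx
  have k_ra : UInt64.ofNat (v.mem.readLE (e.reg .rsp) 8) = ret := hA.slot_ra
  have hsame : Mem.SameExcept
    [⟨(e.reg .rsp).toNat - 160, (e.reg .rsp).toNat⟩,
     ⟨0x800000, 0x1000020⟩,
     ⟨(e.reg .rsi).toNat, (e.reg .rsi).toNat + 4⟩] e.mem v.mem := hA.same
  v_after_call w_rsp_109d47 w_mem_109d47
  simp only [shadowSpan, w_rdi_109d47, hp64] at w_same
  -- the saved registers and the return address, over the pushed return address and through `free`'s footprint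
  have hp13 : s_109d47.mem.readLE (e.reg .rsp - 8) 8 = (e.reg .r13).toNat := by
    rw [w_mem_109d47]
    u_frame k_r13
  rw [w_mem_109d47] at hp13
  have hs13 : s_109d47r.mem.readLE (e.reg .rsp - 8) 8 = (e.reg .r13).toNat := by u_frame hp13
  have hp12 : s_109d47.mem.readLE (e.reg .rsp - 16) 8 = (e.reg .r12).toNat := by
    rw [w_mem_109d47]
    u_frame k_r12
  rw [w_mem_109d47] at hp12
  have hs12 : s_109d47r.mem.readLE (e.reg .rsp - 16) 8 = (e.reg .r12).toNat := by u_frame hp12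
  have hpbp : s_109d47.mem.readLE (e.reg .rsp - 24) 8 = (e.reg .rbp).toNat := by
    rw [w_mem_109d47]
    u_frame k_rbp
  rw [w_mem_109d47] at hpbp
  have hsbp : s_109d47r.mem.readLE (e.reg .rsp - 24) 8 = (e.reg .rbp).toNat := by u_frame hpbp
  have hpbx : s_109d47.mem.readLE (e.reg .rsp - 32) 8 = (e.reg .rbx).toNat := by
    rw [w_mem_109d47]
    u_frame k_rbx
  rw [w_mem_109d47] at hpbx
  have hsbx : s_109d47r.mem.readLE (e.reg .rsp - 32) 8 = (e.reg .rbx).toNat := by u_frame hpbx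
  have hpra : UInt64.ofNat (s_109d47.mem.readLE (e.reg .rsp) 8) = ret := by
    rw [w_mem_109d47]
    u_frame k_ra
  rw [w_mem_109d47] at hpra
  have hsra : UInt64.ofNat (s_109d47r.mem.readLE (e.reg .rsp) 8) = ret := by u_frame hpra
  -- what was written since the cut: stack below the frame, the state word of pv's header, pv's shadow
  have hsv : Mem.SameExcept
    [⟨(e.reg .rsp).toNat - 160, (e.reg .rsp).toNat - 40⟩,
     ⟨F.pv - 24, F.pv - 16⟩,
     ⟨0xC00000 + F.pv / 8, 0xC00000 + (F.pv + 24936 + 7) / 8⟩] v.mem s_109d47r.mem := by u_same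
  -- the footprint since the entry: `free`'s windows lie inside the function's
  have hsame1 : Mem.SameExcept
    [⟨(e.reg .rsp).toNat - 160, (e.reg .rsp).toNat⟩,
     ⟨0x800000, 0x1000020⟩,
     ⟨(e.reg .rsi).toNat, (e.reg .rsi).toNat + 4⟩] e.mem s_109d47r.mem := by u_same
  -- no window written since the cut meets the cursor (a stack object at or above the entry's `rsp + 8`)
  have hoff : ∀ w, w ∈ [(⟨(e.reg .rsp).toNat - 160, (e.reg .rsp).toNat - 40⟩ : Span),
      ⟨F.pv - 24, F.pv - 16⟩,
      ⟨0xC00000 + F.pv / 8, 0xC00000 + (F.pv + 24936 + 7) / 8⟩] → w.hi ≤ R.cur ∨ R.cur + 16 ≤ w.lo := by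
    intro w hw
    simp only [List.mem_cons, List.not_mem_nil, or_false] at hw
    rcases hw with rfl | rfl | rfl
    · left
      simp only
      omega
    · right
      simp only
      omega
    · right
      simp only
      omega
  have hrem1 : rem R s_109d47r.mem = rem R e.mem := by
    rw [← hA.rem]
    exact rem_sameExcept hsv (by omega) hoff
  have hcur1 : CursorOK R s_109d47r.mem := hshape.cursor.sameExcept hsv (by omega) hoff
  -- gif is another object than pv: still live
  have hne : F.gif ≠ F.pv := howns.base_ne hgmem hpmem (by
    intro hcontra
    have := congrArg Prod.snd hcontra
    simp only at this
    omega)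
  have hglive : (Hc.release F.pv).Live F.gif 120 := (howns.live _ hgmem).release_ne hne
  -- THE EXIT ASSERTION at ret15
  refine ReachVia.done ⟨?_, hcur1, hglive⟩
  exact {
    entry := hA.entry
    pre := hA.pre
    rip := w_rip
    rsp := w_rsp
    rbx := (w_kept.get .rbx rfl).trans hA.rbx
    rbp := (w_kept.get .rbp rfl).trans hA.rbp
    r14 := (w_kept.get .r14 rfl).trans hA.r14
    r15 := (w_kept.get .r15 rfl).trans hA.r15
    slot_r13 := hs13
    slot_r12 := hs12
    slot_rbp := hsbp
    slot_rbx := hsbx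
    slot_ra := hsra
    inv := hinv1
    region := hA.region.trans (SameRegion.release Hc F.pv)
    rem := hrem1
    same := hsame1
    code := w_code
    abi := w_inv
  }

/-- **109D4CH (ret15) … `free(GifFile)` … 109D54H (ret16)** (dgif_lib.c:730): `rdi = rbx = gif`, live in the present heap `Hc`
(whatever it is: here `Hc.release pv` of the previous step). The heap becomes `Hc.release F.gif`; the cursor is not met. -/
theorem cf5_seg_free_gif (Lay : Layout) (hLay : Lay.hi = 0x1000000) (μ : Microarch) (hμ : UserX.MicroOK μ) (u₀ : State)
    (hcode : HasCodeNat Lay u₀ Gif.L.DGifCloseFile.entry Gif.Code.code_DGifCloseFile.nat Gif.L.DGifCloseFile.size)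
    (H : Heap) (rest : List Obj) (frames : List (Nat × FrameLayout)) (F : Forest) (R : Rd) (Hc : Heap) (e : State) (ret : Word)
    (h_free : Calls Lay μ ProgX.Base.WayInv (ProgX.Base.conv u₀) ProgX.Base.L.free.entry
      (ProgX.Base.Spec.free.spec Hc rest frames 120))
    (v : State) (hA : DGifCloseFile.At Gif.L.DGifCloseFile.ret15 H rest frames F R Hc u₀ e ret v)
    (hcur0 : CursorOK R v.mem) (hglive : Hc.Live F.gif 120) :
    ReachVia Lay μ ProgX.Base.WayInv v (fun w =>
      DGifCloseFile.At Gif.L.DGifCloseFile.ret16 H rest frames F R (Hc.release F.gif) u₀ e ret w ∧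
      CursorOK R w.mem) := by
  have he := hA.entry
  v_entry he
  obtain ⟨henv, hrdi, herr⟩ := hA.pre
  have w_rip := hA.rip
  have c_rsp : v.reg .rsp = e.reg .rsp - 40 := hA.rsp
  have c_rbx : v.reg .rbx = e.reg .rdi := hA.rbx
  have c_rbp : v.reg .rbp = e.reg .rsi := hA.rbp
  have w_kept : RegsKept [.rsp] v v := RegsKept.refl _ _
  have w_eq : Mem.EqOn ProgX.Base.L.textLo ProgX.Base.L.textHi u₀.mem v.mem := ProgX.Base.conv_code_eqOn hA.code
  have hdf := (show abiInv _ from hA.abi).1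
  have hmx := (show abiInv _ from hA.abi).2
  have hsse := ProgX.Base.sseOK_of_abiInv hA.abi
  -- where gif is: inside the heap's region, as numbers
  have hbase : Hc.base = 0x800000 := hA.region.1.trans henv.heap.base
  have hlimit : Hc.limit = 0xC00000 := hA.region.2.trans henv.heap.limit
  obtain ⟨cap, hcap⟩ := hglive
  have hrg := hA.inv.heap.obj_range hcap
  have hin := hA.inv.heap.obj_inside hcap
  have hglive : Hc.Live F.gif 120 := ⟨cap, hcap⟩
  rw [hbase] at hrg
  simp only at hrg hin
  have hg1 := hrg.1
  have hg2 := hin.2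
  u_walk hcode [hμ.vendor] until [Gif.L.DGifCloseFile.ret16] span [ProgX.Base.L.textLo, ProgX.Base.L.textHi] side (v_side)
  case call_inv =>
    v_inv
  case pre_109d4f =>
    -- 0x109d4f (dgif_lib.c:730) `free(GifFile)`: the heap's invariant over the pushed return address; gif is live
    have e_rsp : (s_109d4f.reg .rsp).toNat + 8 = (e.reg .rsp).toNat - 40 := by
      rw [w_rsp]
      u_omega
    refine ⟨⟨?_, hbase, hlimit, henv.heap.text, henv.heap.offText⟩, Or.inr ?_⟩
    · rw [e_rsp, w_mem]
      exact hA.inv.writeLE_out _ _ _ (by u_omega) (by rw [hbase]; left; u_omega) (by left; u_omega)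
    · rw [w_rdi, hrdi]
      exact hglive
  -- 0x109d54 (ret16): `free(GifFile)` has returned: the heap is `Hc.release F.gif`
  have hne1 : (s_109d4f.reg .rdi).toNat ≠ 0 := by
    rw [w_rdi_109d4f, hrdi]
    omega
  have hinv1 := w_post.2 hne1
  rw [w_rdi_109d4f, hrdi] at hinv1
  clear w_post
  have e8 : (s_109d4f.reg .rsp).toNat + 8 = (e.reg .rsp).toNat - 40 := by
    rw [w_rsp_109d4f]
    u_omega
  rw [e8] at hinv1
  have hcur := henv.ctx.cursor_range henv.heap.inv.shadow
  have k_r13 : v.mem.readLE (e.reg .rsp - 8) 8 = (e.reg .r13).toNat := hA.slot_r13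
  have k_r12 : v.mem.readLE (e.reg .rsp - 16) 8 = (e.reg .r12).toNat := hA.slot_r12
  have k_rbp : v.mem.readLE (e.reg .rsp - 24) 8 = (e.reg .rbp).toNat := hA.slot_rbp
  have k_rbx : v.mem.readLE (e.reg .rsp - 32) 8 = (e.reg .rbx).toNat := hA.slot_rbx
  have k_ra : UInt64.ofNat (v.mem.readLE (e.reg .rsp) 8) = ret := hA.slot_ra
  have hsame : Mem.SameExcept
    [⟨(e.reg .rsp).toNat - 160, (e.reg .rsp).toNat⟩,
     ⟨0x800000, 0x1000020⟩,
     ⟨(e.reg .rsi).toNat, (e.reg .rsi).toNat + 4⟩] e.mem v.mem := hA.same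
  v_after_call w_rsp_109d4f w_mem_109d4f
  simp only [shadowSpan, w_rdi_109d4f, hrdi] at w_same
  -- the saved registers and the return address, over the pushed return address and through `free`'s footprint
  have hp13 : s_109d4f.mem.readLE (e.reg .rsp - 8) 8 = (e.reg .r13).toNat := by
    rw [w_mem_109d4f]
    u_frame k_r13
  rw [w_mem_109d4f] at hp13
  have hs13 : s_109d4fr.mem.readLE (e.reg .rsp - 8) 8 = (e.reg .r13).toNat := by u_frame hp13
  have hp12 : s_109d4f.mem.readLE (e.reg .rsp - 16) 8 = (e.reg .r12).toNat := by
    rw [w_mem_109d4f]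
    u_frame k_r12
  rw [w_mem_109d4f] at hp12
  have hs12 : s_109d4fr.mem.readLE (e.reg .rsp - 16) 8 = (e.reg .r12).toNat := by u_frame hp12
  have hpbp : s_109d4f.mem.readLE (e.reg .rsp - 24) 8 = (e.reg .rbp).toNat := by
    rw [w_mem_109d4f]
    u_frame k_rbp
  rw [w_mem_109d4f] at hpbp
  have hsbp : s_109d4fr.mem.readLE (e.reg .rsp - 24) 8 = (e.reg .rbp).toNat := by u_frame hpbp
  have hpbx : s_109d4f.mem.readLE (e.reg .rsp - 32) 8 = (e.reg .rbx).toNat := by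
    rw [w_mem_109d4f]
    u_frame k_rbx
  rw [w_mem_109d4f] at hpbx
  have hsbx : s_109d4fr.mem.readLE (e.reg .rsp - 32) 8 = (e.reg .rbx).toNat := by u_frame hpbx
  have hpra : UInt64.ofNat (s_109d4f.mem.readLE (e.reg .rsp) 8) = ret := by
    rw [w_mem_109d4f]
    u_frame k_ra
  rw [w_mem_109d4f] at hpra
  have hsra : UInt64.ofNat (s_109d4fr.mem.readLE (e.reg .rsp) 8) = ret := by u_frame hpra
  -- what was written since ret15: stack below the frame, the state word of gif's header, gif's shadow
  have hsv : Mem.SameExcept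
    [⟨(e.reg .rsp).toNat - 160, (e.reg .rsp).toNat - 40⟩,
     ⟨F.gif - 24, F.gif - 16⟩,
     ⟨0xC00000 + F.gif / 8, 0xC00000 + (F.gif + 120 + 7) / 8⟩] v.mem s_109d4fr.mem := by u_same
  -- the footprint since the entry: `free`'s windows lie inside the function's
  have hsame1 : Mem.SameExcept
    [⟨(e.reg .rsp).toNat - 160, (e.reg .rsp).toNat⟩,
     ⟨0x800000, 0x1000020⟩,
     ⟨(e.reg .rsi).toNat, (e.reg .rsi).toNat + 4⟩] e.mem s_109d4fr.mem := by u_same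
  -- no window written since ret15 meets the cursor (a stack object at or above the entry's `rsp + 8`)
  have hoff : ∀ w, w ∈ [(⟨(e.reg .rsp).toNat - 160, (e.reg .rsp).toNat - 40⟩ : Span),
      ⟨F.gif - 24, F.gif - 16⟩,
      ⟨0xC00000 + F.gif / 8, 0xC00000 + (F.gif + 120 + 7) / 8⟩] → w.hi ≤ R.cur ∨ R.cur + 16 ≤ w.lo := by
    intro w hw
    simp only [List.mem_cons, List.not_mem_nil, or_false] at hw
    rcases hw with rfl | rfl | rfl
    · left
      simp only
      omega
    · right
      simp only
      omega
    · right
      simp only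
      omega
  have hrem1 : rem R s_109d4fr.mem = rem R e.mem := by
    rw [← hA.rem]
    exact rem_sameExcept hsv (by omega) hoff
  have hcur1 : CursorOK R s_109d4fr.mem := hcur0.sameExcept hsv (by omega) hoff
  -- THE EXIT ASSERTION at ret16
  refine ReachVia.done ⟨?_, hcur1⟩
  exact {
    entry := hA.entry
    pre := hA.pre
    rip := w_rip
    rsp := w_rsp
    rbx := (w_kept.get .rbx rfl).trans hA.rbx
    rbp := (w_kept.get .rbp rfl).trans hA.rbp
    r14 := (w_kept.get .r14 rfl).trans hA.r14
    r15 := (w_kept.get .r15 rfl).trans hA.r15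
    slot_r13 := hs13
    slot_r12 := hs12
    slot_rbp := hsbp
    slot_rbx := hsbx
    slot_ra := hsra
    inv := hinv1
    region := hA.region.trans (SameRegion.release Hc F.gif)
    rem := hrem1
    same := hsame1
    code := w_code
    abi := w_inv
  }


/-- **`*ErrorCode` is live under every heap** (`ErrPtr.liveIn` of Gif/Spec/Carry.lean without a pushed frame: DGifCloseFile has no
protected frame): it lies in the stack region, so the object of `ErrPtr`'s `LiveIn` is a stack object of the caller's frames. -/
theorem cf5_errLive {H : Heap} {rest : List Obj} {frames : List (Nat × FrameLayout)} {R : Rd} {p top : Nat} {mem : Mem}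
    (h : ErrPtr H rest frames R p) (hp : p ≠ 0) (hinv : HeapInv H rest frames top mem) (H' : Heap) :
    LiveIn (H'.liveObjs ++ rest) frames p 4 := by
  rcases h with h0 | ⟨hl, hlo, hhi, _⟩
  · exact absurd h0 hp
  · obtain ⟨o, ho, k1, k2⟩ := hl
    rcases List.mem_append.mp ho with hs | hoth
    · exact ⟨o, List.mem_append_left _ hs, k1, k2⟩
    · exfalso
      rcases List.mem_append.mp hoth with hheap | hr
      · obtain ⟨⟨c, hlive⟩, _⟩ := Heap.live_of_mem_liveObjs hheap
        have h1 := hinv.heap.obj_range hlive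
        have h2 := hinv.heap.offStack
        have h3 := hinv.heap.room
        have h4 := hinv.heap.size_le_cap hlive
        simp only at h1 h4
        omega
      · have hoff := hinv.shadow.off o (List.mem_append_right _ hr)
        unfold OffStack at hoff
        omega

/-- **109D54H (ret16) … the `ret`** (dgif_lib.c:731-735): `test rbp, rbp`: `ErrorCode == NULL` (109DC0H: `r12d = 1`, back to the exit),
otherwise the checked store `*ErrorCode = 0` (`ErrPtr`: a live stack object of a caller's frame, at or above the entry's `rsp + 8`,
off the cursor: `cf5_errLive`), `r12d = 1`; the exit 109D6EH: `eax = r12d`, `add rsp, 8`, four pops, `ret`. The post is stated for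
the present heap `Hc` (whatever it is: `SameRegion` comes with `At`), its invariant raised to the caller's stack pointer. -/
theorem cf5_seg_exit (Lay : Layout) (hLay : Lay.hi = 0x1000000) (μ : Microarch) (hμ : UserX.MicroOK μ) (u₀ : State)
    (hcode : HasCodeNat Lay u₀ Gif.L.DGifCloseFile.entry Gif.Code.code_DGifCloseFile.nat Gif.L.DGifCloseFile.size)
    (h_store4 : Asan.SmallCheck Lay μ ProgX.Base.WayInv (ProgX.Base.CodeOK u₀) [.rax, .rcx, .rdx] 4 ProgX.Base.L.__asan_store4_noabort.entry)
    (H : Heap) (rest : List Obj) (frames : List (Nat × FrameLayout)) (F : Forest) (R : Rd) (Hc : Heap) (e : State) (ret : Word)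
    (v : State) (hA : DGifCloseFile.At Gif.L.DGifCloseFile.ret16 H rest frames F R Hc u₀ e ret v)
    (hcur0 : CursorOK R v.mem) :
    ReachVia Lay μ ProgX.Base.WayInv v (Returned (conv u₀) (DGifCloseFile.spec H rest frames F R) e ret) := by
  have he := hA.entry
  v_entry he
  obtain ⟨henv, hrdi, herr⟩ := hA.pre
  have w_rip := hA.rip
  have c_rsp : v.reg .rsp = e.reg .rsp - 40 := hA.rsp
  have c_rbx : v.reg .rbx = e.reg .rdi := hA.rbx
  have c_rbp : v.reg .rbp = e.reg .rsi := hA.rbp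
  have w_kept : RegsKept [.rsp] v v := RegsKept.refl _ _
  have w_eq : Mem.EqOn ProgX.Base.L.textLo ProgX.Base.L.textHi u₀.mem v.mem := ProgX.Base.conv_code_eqOn hA.code
  have hdf := (show abiInv _ from hA.abi).1
  have hmx := (show abiInv _ from hA.abi).2
  have hsse := ProgX.Base.sseOK_of_abiInv hA.abi
  have hbase : Hc.base = 0x800000 := hA.region.1.trans henv.heap.base
  have hlimit : Hc.limit = 0xC00000 := hA.region.2.trans henv.heap.limit
  have hcur := henv.ctx.cursor_range henv.heap.inv.shadow
  -- the saved registers and the return address, as the walker reads them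
  have l_r13 : v.mem.readLE (e.reg .rsp - 8) 8 = (e.reg .r13).toNat := hA.slot_r13
  have l_r12 : v.mem.readLE (e.reg .rsp - 16) 8 = (e.reg .r12).toNat := hA.slot_r12
  have l_rbp : v.mem.readLE (e.reg .rsp - 24) 8 = (e.reg .rbp).toNat := hA.slot_rbp
  have l_rbx : v.mem.readLE (e.reg .rsp - 32) 8 = (e.reg .rbx).toNat := hA.slot_rbx
  have l_ra : UInt64.ofNat (v.mem.readLE (e.reg .rsp) 8) = ret := hA.slot_ra
  by_cases h0 : (e.reg .rsi).toNat = 0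
  · -- 0x109d54 `test rbp, rbp ; je` taken (dgif_lib.c:731, ErrorCode == NULL): 0x109dc0 `r12d = 1`, the exit
    u_walk hcode [hμ.vendor] span [ProgX.Base.L.textLo, ProgX.Base.L.textHi] side (v_side)
    refine ReachVia.done ?_
    v_returned
    · -- the post: the present heap, its invariant raised to the caller's stack pointer; nothing written since ret16
      refine ⟨Hc, hA.region, ?_, ?_, ?_⟩
      · rw [w_mem]
        exact henv.heap.raise_back hA.inv (by omega)
      · rw [w_mem]
        exact hcur0
      · rw [w_mem]
        exact hA.rem
    · -- saved: four pops; r14 r15 never touched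
      intro r hr
      cases r <;> first | exact absurd hr (by decide) | (with_reducible assumption) | skip
      · rw [w_kept .r14 rfl]
        exact hA.r14
      · rw [w_kept .r15 rfl]
        exact hA.r15
    · -- same: the carried footprint
      simp only [X86.User.Spec.footprint, vspec]
      rw [w_mem]
      exact hA.same
  · -- `ErrorCode ≠ NULL`: 4 bytes of a stack object of a caller's frame, at or above the entry's `rsp + 8`, off the cursor
    have herr' : LiveIn (H.liveObjs ++ rest) frames (e.reg .rsi).toNat 4 ∧ 0x700000 ≤ (e.reg .rsi).toNat ∧
        (e.reg .rsi).toNat + 4 ≤ 0x800000 ∧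
        ((e.reg .rsi).toNat + 4 ≤ R.cur ∨ R.cur + 16 ≤ (e.reg .rsi).toNat) := by
      rcases herr with hz | hh
      · exact absurd hz h0
      · exact hh
    obtain ⟨hel, he1, he2, heoff⟩ := herr'
    have hew := hel.where_ henv.heap.inv.shadow henv.heap.shadowPre.offText (by decide)
    have he3 : (e.reg .rsp).toNat + 8 ≤ (e.reg .rsi).toNat := by omega
    clear hew
    have hsame : Mem.SameExcept
      [⟨(e.reg .rsp).toNat - 160, (e.reg .rsp).toNat⟩,
       ⟨0x800000, 0x1000020⟩,
       ⟨(e.reg .rsi).toNat, (e.reg .rsi).toNat + 4⟩] e.mem v.mem := hA.same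
    u_walk hcode [hμ.vendor] span [ProgX.Base.L.textLo, ProgX.Base.L.textHi] side (v_side)
    case check_109d5c =>
      -- 0x109d5c (dgif_lib.c:732): the store `*ErrorCode = 0` goes into a live stack object of a caller's frame
      have hun : ShadowUntouched v.mem s_109d5c.mem := by v_untouched
      have hl : LiveIn (Hc.liveObjs ++ rest) frames (e.reg .rsi).toNat 4 :=
        Gif.Spec.DGifCloseFile_5.cf5_errLive herr h0 henv.heap.inv Hc
      exact hl.accSmall hA.inv.shadow hun _ 4 (by decide) (by u_omega) (by u_omega)
    refine ReachVia.done ?_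
    v_returned
    · -- the post: the present heap; the two stores since ret16 (a return address below the frame, `*ErrorCode`) lie in the
      -- stack region: off the heap's region, off the shadow, off the cursor
      have hsv : Mem.SameExcept
        [⟨(e.reg .rsp).toNat - 160, (e.reg .rsp).toNat - 40⟩,
         ⟨(e.reg .rsi).toNat, (e.reg .rsi).toNat + 4⟩] v.mem s_109d7b.mem := by
        rw [w_mem]
        u_same
      have hoff : ∀ w, w ∈ [(⟨(e.reg .rsp).toNat - 160, (e.reg .rsp).toNat - 40⟩ : Span),
          ⟨(e.reg .rsi).toNat, (e.reg .rsi).toNat + 4⟩] → w.hi ≤ R.cur ∨ R.cur + 16 ≤ w.lo := by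
        intro w hw
        simp only [List.mem_cons, List.not_mem_nil, or_false] at hw
        rcases hw with rfl | rfl
        · left
          simp only
          omega
        · simp only
          omega
      refine ⟨Hc, hA.region, ?_, ?_, ?_⟩
      · rw [w_mem]
        refine henv.heap.raise_back (t := (e.reg .rsp).toNat - 40) ?_ (by omega)
        refine (hA.inv.writeLE_out _ _ _ (by u_omega) (by rw [hbase]; left; u_omega) (by left; u_omega)).writeLE_out
          _ _ _ (by u_omega) (by rw [hbase]; left; u_omega) (by left; u_omega)
      · exact hcur0.sameExcept hsv (by omega) hoff
      · rw [← hA.rem]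
        exact rem_sameExcept hsv (by omega) hoff
    · -- saved: four pops; r14 r15 never touched
      intro r hr
      cases r <;> first | exact absurd hr (by decide) | (with_reducible assumption) | skip
      · rw [w_kept .r14 rfl]
        exact hA.r14
      · rw [w_kept .r15 rfl]
        exact hA.r15

end Gif.Spec.DGifCloseFile_5
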